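-- pv_equiv track=rewrite | github.com/temeddix/interview-practice | baekjoon/2629.py | get_measurables
-- ===== SOURCE A (Python) =====
-- def get_measurables(weights: list[int]) -> set[int]:
--     measurables = set[int]([0])
--
--     for weight in weights:
--         new_measurables = set[int]()
--         for measurable in measurables:
--             new_measurables.add(measurable + weight)
--             new_measurables.add(measurable - weight)
--         measurables.update(new_measurables)
--
--     return measurables
-- ===== SOURCE B (Python) =====
-- def get_measurables(weights: list[int]) -> set[int]:
--     if not weights:
--         return {0}
--     prev = get_measurables(weights[:-1])
--     w = weights[-1]
--     new = {v for m in prev for v in (m + w, m - w)}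
--     prev.update(new)
--     return prev
-- ===== Notes on version B (the rewrite author's own statement) =====
-- stated objective: simpler
-- what changed: Replaced the imperative loop over weights with its inner element loop by a short non-tail recursion on the weights: the empty list yields {0}, otherwise the result for all-but-the-last weight is extended with a set comprehension of its +/- last-weight shifts.
import Mathlib
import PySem

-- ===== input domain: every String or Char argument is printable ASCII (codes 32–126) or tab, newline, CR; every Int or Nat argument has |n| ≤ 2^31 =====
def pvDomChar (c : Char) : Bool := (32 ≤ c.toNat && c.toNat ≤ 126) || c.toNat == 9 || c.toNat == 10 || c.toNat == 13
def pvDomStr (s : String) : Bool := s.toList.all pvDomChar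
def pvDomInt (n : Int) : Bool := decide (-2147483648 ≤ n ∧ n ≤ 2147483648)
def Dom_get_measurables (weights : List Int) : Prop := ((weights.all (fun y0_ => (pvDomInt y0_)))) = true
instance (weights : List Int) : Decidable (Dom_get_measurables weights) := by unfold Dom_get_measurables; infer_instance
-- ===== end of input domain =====

-- B replaces A's imperative per-weight set building/merging loop with a short recursion on the
-- weights updating with a set comprehension of the +/- last-weight shifts (objective: simpler). Return value only (a set).

-- ===== PORT A =====
def get_measurables (weights : List Int) : List Int :=
  weights.foldl
    (fun measurables weight =>
      let new_measurables : PySem.Set Int :=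
        measurables.foldl
          (fun n m => PySem.Set.add (PySem.Set.add n (m + weight)) (m - weight))
          PySem.Set.empty
      PySem.Set.update measurables new_measurables)
    (PySem.Set.ofList [0])

-- ===== PORT B =====
def get_measurables_alt (weights : List Int) : List Int :=
  if h : weights = [] then PySem.Set.ofList [0]
  else
    let prev : PySem.Set Int := get_measurables_alt (PySem.List.slice weights none (some (-1)))
    let w : Int := PySem.List.pyGetD weights (-1) 0
    let new : PySem.Set Int := PySem.Set.ofList (prev.flatMap (fun m => [m + w, m - w]))
    PySem.Set.update prev new
termination_by weights.length
decreasing_by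
  simp only [PySem.List.slice_to_neg_one, List.length_dropLast]
  have := List.length_pos_iff.mpr h
  omega

-- ===== PRECONDITION & SPEC =====
def Spec_get_measurables (weights : List Int) (out : List Int) : Prop := out = get_measurables_alt weights
instance (weights : List Int) (out : List Int) : Decidable (Spec_get_measurables weights out) := by unfold Spec_get_measurables; infer_instance

-- ===== CLAIM (what is proved, stated in full; the proofs are below) =====
def Claim_equal_get_measurables : Prop := ∀ (weights : List Int), Dom_get_measurables weights → Spec_get_measurables weights (get_measurables weights)

-- ===== LEMMAS AND PROOFS =====

-- A's inner loop (add m+w, then m-w, for each m) is updating by the flatMapped pair list.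
theorem inner_fold_eq_update (S : List Int) (w : Int) (e : PySem.Set Int) :
    S.foldl (fun n m => PySem.Set.add (PySem.Set.add n (m + w)) (m - w)) e
      = PySem.Set.update e (S.flatMap (fun m => [m + w, m - w])) := by
  induction S generalizing e with
  | nil => simp [PySem.Set.update_nil]
  | cons m S ih =>
      simp only [List.foldl_cons, List.flatMap_cons, ih]
      rfl

-- updating with set(l) is the same as updating with l
theorem update_ofList (s : PySem.Set Int) (l : List Int) :
    PySem.Set.update s (PySem.Set.ofList l) = PySem.Set.update s l := by
  induction l using List.reverseRecOn with
  | nil => rfl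
  | append_singleton l x ih =>
      rw [PySem.Set.ofList_append_singleton, PySem.Set.update_append,
        PySem.Set.update_cons, PySem.Set.update_nil]
      by_cases hx : x ∈ PySem.Set.ofList l
      · rw [PySem.Set.add_of_mem hx, ih, PySem.Set.add_of_mem]
        exact (PySem.Set.mem_update _ _ _).mpr (Or.inr ((PySem.Set.mem_ofList _ _).mp hx))
      · rw [PySem.Set.add_of_not_mem hx, PySem.Set.update_append, ih,
          PySem.Set.update_cons, PySem.Set.update_nil]

-- one step of A (inner loop into a fresh set, then update) equals one step of B (update with the comprehension)
theorem step_eq (S : PySem.Set Int) (w : Int) :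
    PySem.Set.update S
        (S.foldl (fun n m => PySem.Set.add (PySem.Set.add n (m + w)) (m - w)) PySem.Set.empty)
      = PySem.Set.update S (PySem.Set.ofList (S.flatMap (fun m => [m + w, m - w]))) := by
  rw [inner_fold_eq_update]
  rw [PySem.Set.update_empty, update_ofList]

theorem main_eq (weights : List Int) :
    get_measurables weights = get_measurables_alt weights := by
  induction weights using List.reverseRecOn with
  | nil => simp [get_measurables, get_measurables_alt]
  | append_singleton xs x ih =>
      rw [get_measurables, List.foldl_append, List.foldl_cons, List.foldl_nil,
        get_measurables_alt]
      have hne : xs ++ [x] ≠ [] := by simp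
      rw [dif_neg hne]
      simp only [PySem.List.slice_to_neg_one, List.dropLast_concat,
        PySem.List.pyGetD_neg_one_append_singleton]
      rw [← ih, ← get_measurables]
      exact step_eq _ x

-- ===== VERDICT (by name: the statement is the Claim_ definition above) =====
theorem get_measurables_spec : Claim_equal_get_measurables := by
  intro weights _
  exact main_eq weights
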